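-- pv_equiv track=rewrite | github.com/CypherKingdom/PythonCodes | models/education.py | create_grade_histogram
-- ===== SOURCE A (Python) =====
-- def create_grade_histogram(grades):
--     """
--     Create a histogram (dictionary) of grade frequencies.
--
--     Args:
--         grades (list): List of letter grades
--
--     Returns:
--         dict: Dictionary with grades as keys and frequencies as values
--     """
--     histogram = {}
--     for grade in grades:
--         if grade in histogram:
--             histogram[grade] += 1
--         else:
--             histogram[grade] = 1
--
--     return histogram
-- ===== SOURCE B (Python) =====
-- def create_grade_histogram(grades):
--     return {g: grades.count(g) for g in dict.fromkeys(grades)}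
-- ===== Notes on version B (the rewrite author's own statement) =====
-- stated objective: idiomatic
-- what changed: Replaces A's single accumulating pass over a mutable dict with a one-line comprehension: dedup the grades in first-appearance order, then count each distinct grade with grades.count.
import Mathlib
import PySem

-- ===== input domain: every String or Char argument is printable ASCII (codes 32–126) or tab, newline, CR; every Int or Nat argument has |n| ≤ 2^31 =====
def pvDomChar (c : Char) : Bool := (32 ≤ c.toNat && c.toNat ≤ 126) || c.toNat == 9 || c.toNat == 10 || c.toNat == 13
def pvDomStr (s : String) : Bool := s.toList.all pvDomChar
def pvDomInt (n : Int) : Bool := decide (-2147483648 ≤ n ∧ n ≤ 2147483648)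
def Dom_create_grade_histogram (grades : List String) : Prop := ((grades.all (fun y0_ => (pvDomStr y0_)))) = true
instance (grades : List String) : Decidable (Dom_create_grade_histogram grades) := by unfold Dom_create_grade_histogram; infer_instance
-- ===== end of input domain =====

-- B replaces A's single accumulating dict pass with dedup-then-count (idiomatic comprehension); same result.
-- ===== PORT A =====
def create_grade_histogram (grades : List String) : List (String × Int) :=
  (grades.foldl
    (fun h g => if h.contains g then h.insert g (h.getD g 0 + 1) else h.insert g 1)
    PySem.Dict.empty).items

-- ===== PORT B =====
def create_grade_histogram_alt (grades : List String) : List (String × Int) :=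
  (PySem.List.dedup grades).map (fun g => (g, (grades.count g : Int)))

-- ===== PRECONDITION & SPEC =====
def Spec_create_grade_histogram (grades : List String) (out : List (String × Int)) : Prop := out = create_grade_histogram_alt grades
instance (grades : List String) (out : List (String × Int)) : Decidable (Spec_create_grade_histogram grades out) := by unfold Spec_create_grade_histogram; infer_instance

-- ===== CLAIM (what is proved, stated in full; the proofs are below) =====
def Claim_equal_create_grade_histogram : Prop := ∀ (grades : List String), Dom_create_grade_histogram grades → Spec_create_grade_histogram grades (create_grade_histogram grades)

-- ===== LEMMAS AND PROOFS =====
-- A's two branches are the same dict update: if the key is absent, its current count is 0.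
theorem hist_step_eq (h : PySem.Dict String Int) (g : String) :
    (if h.contains g then h.insert g (h.getD g 0 + 1) else h.insert g 1)
      = h.insert g (h.getD g 0 + 1) := by
  by_cases hc : h.contains g = true
  · simp [hc]
  · rw [if_neg hc, PySem.Dict.getD_of_not_contains h 0 (by simpa using hc)]; norm_num

-- ===== VERDICT (by name: the statement is the Claim_ definition above) =====
theorem create_grade_histogram_spec : Claim_equal_create_grade_histogram := by
  intro grades _
  show create_grade_histogram grades = create_grade_histogram_alt grades
  unfold create_grade_histogram create_grade_histogram_alt
  have hf : (fun (h : PySem.Dict String Int) (g : String) =>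
      if h.contains g then h.insert g (h.getD g 0 + 1) else h.insert g 1)
      = fun h g => h.insert g (h.getD g 0 + 1) := by
    funext h g; exact hist_step_eq h g
  rw [hf, PySem.Dict.foldl_insert_getD_add_one_eq_counter, PySem.Dict.items_counter,
    PySem.List.dedup_eq_ofList]
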